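-- pv_equiv track=rewrite | github.com/andrewsmike/redhdl | redhdl/voxel/region.py | point_ranges
-- ===== SOURCE A (Python) =====
-- def point_ranges(points: set[int], min_gap_size: int = 3) -> list[tuple[int, int]]:
--     """
--     The minimal set of ranges completely covering a set of points, with gap sizes
--     of at least min_gap_size.
--     Resulting ranges are inclusive.
--
--     >>> point_ranges({8, 10, 11, 15, 16, 19, 20}, min_gap_size=1)
--     [(8, 8), (10, 11), (15, 16), (19, 20)]
--
--     >>> point_ranges({8, 10, 11, 15, 16, 19, 20}, min_gap_size=3)
--     [(8, 11), (15, 20)]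
--
--     >>> point_ranges({8, 10, 11, 15, 16, 19, 20}, min_gap_size=4)
--     [(8, 20)]
--     """
--     lower_bound, upper_bound = min(points), max(points)
--
--     ranges: list[tuple[int, int]] = []
--
--     # Track the current distance to the last block (moving towards higher
--     # numbers) in gap_count and the current range's lower bound (reset to None
--     # once we get min_gap_size away from the current ranges and we carve it
--     # out).
--     gap_count = 0
--     current_lower_bound: int | None = None
--     for i in range(lower_bound, upper_bound + 1):
--         if i in points:
--             # current_lower_bound is None: New range!
--             # current_lower_bound is not None: Continue range, reset gap count
--             gap_count = 0
--             if current_lower_bound is None: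
--                 current_lower_bound = i
--         else:
--             # current_lower_bound is None: Not in a range, continue onwards.
--             # current_lower_bound is not None: In a range, end range and reset iff
--             # gap_count is >= min_gap_size.
--             gap_count += 1
--             if gap_count == min_gap_size:
--                 assert current_lower_bound is not None  # For MyPy.
--                 ranges.append((current_lower_bound, i - min_gap_size))
--                 current_lower_bound = None
--
--     if current_lower_bound is not None:
--         return ranges + [(current_lower_bound, i)]
--     else:
--         return ranges
-- ===== SOURCE B (Python) =====
-- def point_ranges(points: set[int], min_gap_size: int = 3) -> list[tuple[int, int]]:
--     """Sort the points and scan consecutive pairs, splitting where the gap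
--     between neighbours has at least min_gap_size missing integers."""
--     pts = sorted(points)
--     ranges: list[tuple[int, int]] = []
--     start = pts[0]
--     prev = pts[0]
--     for p in pts[1:]:
--         if 0 < min_gap_size <= p - prev - 1:
--             ranges.append((start, prev))
--             start = p
--         prev = p
--     ranges.append((start, prev))
--     return ranges
-- ===== Notes on version B (the rewrite author's own statement) =====
-- stated objective: faster
-- what changed: Instead of walking every integer from min(points) to max(points) with a gap counter, B sorts the points and scans consecutive pairs once, splitting whenever at least min_gap_size integers are missing between neighbours.
import Mathlib
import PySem

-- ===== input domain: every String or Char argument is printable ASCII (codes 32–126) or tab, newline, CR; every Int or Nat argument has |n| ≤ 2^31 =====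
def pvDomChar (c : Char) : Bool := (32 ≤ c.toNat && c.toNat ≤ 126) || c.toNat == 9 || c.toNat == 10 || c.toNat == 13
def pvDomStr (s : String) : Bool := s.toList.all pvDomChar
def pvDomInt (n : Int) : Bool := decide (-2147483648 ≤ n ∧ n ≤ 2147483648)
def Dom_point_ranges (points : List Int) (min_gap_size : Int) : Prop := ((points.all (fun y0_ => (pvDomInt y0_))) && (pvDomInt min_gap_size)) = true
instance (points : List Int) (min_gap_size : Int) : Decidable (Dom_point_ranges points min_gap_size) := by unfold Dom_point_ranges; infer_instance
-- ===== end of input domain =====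

-- B replaces A's walk over every integer in [min(points), max(points)] by a single scan
-- of the sorted points, splitting at gaps of at least min_gap_size (objective: faster).


-- ===== PORT A =====
-- loop body of A: state = (ranges, gap_count, current_lower_bound, last i)
def stepA (points : List Int) (mgs : Int)
    (st : List (Int × Int) × Int × Option Int × Int) (i : Int) :
    List (Int × Int) × Int × Option Int × Int :=
  match st with
  | (ranges, gap, clb, _) =>
    if points.contains i then
      (ranges, 0, some (clb.getD i), i)
    else if gap + 1 = mgs then
      match clb with
      | some c => (ranges ++ [(c, i - mgs)], gap + 1, none, i)
      | none => (ranges, gap + 1, none, i)  -- Python's assert site; unreachable from the initial state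
    else
      (ranges, gap + 1, clb, i)

def point_ranges (points : List Int) (min_gap_size : Int) : List (Int × Int) :=
  match PySem.List.min? points (fun x => x), PySem.List.max? points (fun x => x) with
  | some lower, some upper =>
    match (PySem.List.pyRange lower (upper + 1) 1).foldl (stepA points min_gap_size) ([], 0, none, 0) with
    | (ranges, _, some c, i) => ranges ++ [(c, i)]
    | (ranges, _, none, _) => ranges
  | _, _ => []  -- min() of an empty set raises ValueError; excluded by Pre_

-- ===== PORT B =====
-- loop body of B: state = (ranges, start, prev)
def stepB (mgs : Int) (st : List (Int × Int) × Int × Int) (p : Int) :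
    List (Int × Int) × Int × Int :=
  match st with
  | (ranges, start, prev) =>
    if 0 < mgs ∧ mgs ≤ p - prev - 1 then
      (ranges ++ [(start, prev)], p, p)
    else
      (ranges, start, p)

def point_ranges_alt (points : List Int) (min_gap_size : Int) : List (Int × Int) :=
  match PySem.List.sorted points (fun x => x) false with
  | [] => []  -- pts[0] raises IndexError on the empty set; excluded by Pre_
  | p0 :: rest =>
    match rest.foldl (stepB min_gap_size) ([], p0, p0) with
    | (ranges, start, prev) => ranges ++ [(start, prev)]

-- ===== PRECONDITION & SPEC =====
-- Pre_ excludes only the empty list: both Pythons raise there (ValueError / IndexError).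
def Pre_point_ranges (points : List Int) (min_gap_size : Int) : Prop := points ≠ []
instance (points : List Int) (min_gap_size : Int) : Decidable (Pre_point_ranges points min_gap_size) := by unfold Pre_point_ranges; infer_instance
def pvWitness_point_ranges : List Int × Int := ([8, 10, 11, 15, 16, 19, 20], 3)

def Spec_point_ranges (points : List Int) (min_gap_size : Int) (out : List (Int × Int)) : Prop := out = point_ranges_alt points min_gap_size
instance (points : List Int) (min_gap_size : Int) (out : List (Int × Int)) : Decidable (Spec_point_ranges points min_gap_size out) := by unfold Spec_point_ranges; infer_instance

-- ===== CLAIM (what is proved, stated in full; the proofs are below) =====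
def Claim_equal_point_ranges : Prop := ∀ (points : List Int) (min_gap_size : Int), Dom_point_ranges points min_gap_size → Pre_point_ranges points min_gap_size → Spec_point_ranges points min_gap_size (point_ranges points min_gap_size)

-- ===== LEMMAS AND PROOFS =====

-- A's loop over a run of misses with no current range open: the gap counter just counts.
theorem missA_none (points : List Int) (mgs : Int) :
    ∀ (n : Nat) (a g li : Int) (ranges : List (Int × Int)),
      (∀ j : Int, a ≤ j → j < a + n → j ∉ points) →
      (PySem.List.pyRange a (a + n) 1).foldl (stepA points mgs) (ranges, g, none, li)
        = (ranges, g + n, none, if n = 0 then li else a + n - 1) := by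
  intro n
  induction n with
  | zero =>
    intro a g li ranges _
    rw [PySem.List.pyRange_one_eq_nil (by simp)]
    simp
  | succ n ih =>
    intro a g li ranges h
    rw [PySem.List.pyRange_one_cons (by push_cast; omega)]
    rw [List.foldl_cons]
    have hca : a ∉ points := h a le_rfl (by push_cast; omega)
    have hstep : stepA points mgs (ranges, g, none, li) a = (ranges, g + 1, none, a) := by
      by_cases hm : g + 1 = mgs <;> simp [stepA, hca, hm]
    rw [hstep]
    have he : a + ((n + 1 : Nat) : Int) = (a + 1) + (n : Int) := by push_cast; ring
    rw [he, ih (a + 1) (g + 1) a ranges ?_]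
    · by_cases h0 : n = 0 <;> (simp [h0]; try omega)
    · intro j hj1 hj2
      refine h j (by omega) ?_
      push_cast at hj2 ⊢
      omega

-- A's loop over a run of misses with a range open: close it if the gap reaches min_gap_size.
theorem missA_some (points : List Int) (mgs : Int) :
    ∀ (n : Nat) (a g li c : Int) (ranges : List (Int × Int)), 0 ≤ g →
      (∀ j : Int, a ≤ j → j < a + n → j ∉ points) →
      (PySem.List.pyRange a (a + n) 1).foldl (stepA points mgs) (ranges, g, some c, li)
        = if g < mgs ∧ mgs ≤ g + n then
            (ranges ++ [(c, a - g - 1)], g + n, none, a + n - 1)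
          else
            (ranges, g + n, some c, if n = 0 then li else a + n - 1) := by
  intro n
  induction n with
  | zero =>
    intro a g li c ranges hg _
    have hcond : ¬ (g < mgs ∧ mgs ≤ g + ((0 : Nat) : Int)) := by push_cast; omega
    rw [PySem.List.pyRange_one_eq_nil (by simp), if_neg hcond]
    simp
  | succ n ih =>
    intro a g li c ranges hg h
    rw [PySem.List.pyRange_one_cons (by push_cast; omega), List.foldl_cons]
    have hca : a ∉ points := h a le_rfl (by push_cast; omega)
    have he : a + ((n + 1 : Nat) : Int) = (a + 1) + (n : Int) := by push_cast; ring
    have hrest : ∀ j : Int, a + 1 ≤ j → j < (a + 1) + (n : Int) → j ∉ points := by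
      intro j hj1 hj2
      refine h j (by omega) ?_
      push_cast at hj2 ⊢
      omega
    by_cases hm : g + 1 = mgs
    · have hstep : stepA points mgs (ranges, g, some c, li) a
          = (ranges ++ [(c, a - mgs)], g + 1, none, a) := by
        simp [stepA, hca, hm]
      rw [hstep, he, missA_none points mgs n (a + 1) (g + 1) a _ hrest]
      have hcond : g < mgs ∧ mgs ≤ g + ((n + 1 : Nat) : Int) := by push_cast; omega
      rw [if_pos hcond]
      have e1 : a - mgs = a - g - 1 := by omega
      rw [e1]
      by_cases h0 : n = 0 <;> (simp [h0]; try omega)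
    · have hstep : stepA points mgs (ranges, g, some c, li) a
          = (ranges, g + 1, some c, a) := by
        simp [stepA, hca, hm]
      rw [hstep, he, ih (a + 1) (g + 1) a c ranges (by omega) hrest]
      by_cases hC : g < mgs ∧ mgs ≤ g + ((n + 1 : Nat) : Int)
      · have hc1 : (g + 1 < mgs ∧ mgs ≤ (g + 1) + (n : Int)) := by
          push_cast at hC
          omega
        rw [if_pos hc1, if_pos hC]
        have e1 : (a + 1) - (g + 1) - 1 = a - g - 1 := by ring
        rw [e1]
        simp
        omega
      · have hc1 : ¬ (g + 1 < mgs ∧ mgs ≤ (g + 1) + (n : Int)) := by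
          push_cast at hC
          omega
        rw [if_neg hc1, if_neg hC]
        by_cases h0 : n = 0 <;> (simp [h0]; try omega)

-- A's loop from one point p (exclusive) up to the next point q (inclusive).
theorem segA (points : List Int) (mgs : Int) (p q c : Int) (ranges : List (Int × Int))
    (hpq : p ≤ q) (hq : q ∈ points)
    (hgap : ∀ j : Int, p < j → j < q → j ∉ points) :
    (PySem.List.pyRange (p + 1) (q + 1) 1).foldl (stepA points mgs) (ranges, 0, some c, p)
      = if 0 < mgs ∧ mgs ≤ q - p - 1 then (ranges ++ [(c, p)], 0, some q, q)
        else (ranges, 0, some c, q) := by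
  rcases eq_or_lt_of_le hpq with heq | hlt
  · subst heq
    rw [PySem.List.pyRange_one_eq_nil (by omega), if_neg (by omega)]
    simp
  · have hsplit : PySem.List.pyRange (p + 1) (q + 1) 1
        = PySem.List.pyRange (p + 1) q 1 ++ PySem.List.pyRange q (q + 1) 1 :=
      PySem.List.pyRange_one_append _ _ _ (by omega) (by omega)
    rw [hsplit, PySem.List.pyRange_one_singleton, List.foldl_append]
    have hq' : q = (p + 1) + (((q - (p + 1)).toNat : Nat) : Int) := by omega
    rw [show PySem.List.pyRange (p + 1) q 1
        = PySem.List.pyRange (p + 1) ((p + 1) + (((q - (p + 1)).toNat : Nat) : Int)) 1 by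
      rw [← hq']]
    rw [missA_some points mgs ((q - (p + 1)).toNat) (p + 1) 0 p c ranges le_rfl ?_]
    · by_cases hc : 0 < mgs ∧ mgs ≤ q - p - 1
      · have hcond : (0 : Int) < mgs ∧ mgs ≤ 0 + (((q - (p + 1)).toNat : Nat) : Int) := by
          obtain ⟨hc1, hc2⟩ := hc
          refine ⟨hc1, ?_⟩
          omega
        rw [if_pos hcond, if_pos hc]
        have e1 : p + 1 - 0 - 1 = p := by ring
        rw [e1]
        simp only [List.foldl_cons, List.foldl_nil]
        simp [stepA, hq]
      · have hcond : ¬ ((0 : Int) < mgs ∧ mgs ≤ 0 + (((q - (p + 1)).toNat : Nat) : Int)) := by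
          intro hcon
          exact hc ⟨hcon.1, by omega⟩
        rw [if_neg hcond, if_neg hc]
        simp only [List.foldl_cons, List.foldl_nil]
        simp [stepA, hq]
    · intro j hj1 hj2
      refine hgap j (by omega) (by omega)

-- the head of a chain is at most its last element
theorem chain_le_getLast (R : Int → Int → Prop) (hR : ∀ a b, R a b → a ≤ b) :
    ∀ (l : List Int) (q : Int), List.IsChain R (q :: l) → q ≤ (q :: l).getLast (by simp) := by
  intro l
  induction l with
  | nil => intro q _; simp
  | cons b t ih =>
    intro q hch
    rw [List.isChain_cons_cons] at hch
    have h1 : q ≤ b := hR _ _ hch.1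
    have h2 := ih b hch.2
    rw [List.getLast_cons (by simp)]
    exact le_trans h1 h2

-- A, run over the whole span from prev to the last point, computes B's scan.
theorem mainA (points : List Int) (mgs : Int) :
    ∀ (l : List Int) (prev c : Int) (ranges : List (Int × Int)),
      (∀ b ∈ l, b ∈ points) →
      List.IsChain (fun x y => x ≤ y ∧ ∀ j : Int, x < j → j < y → j ∉ points)
        (prev :: l) →
      (PySem.List.pyRange (prev + 1) ((prev :: l).getLast (by simp) + 1) 1).foldl
          (stepA points mgs) (ranges, 0, some c, prev)
        = ((l.foldl (stepB mgs) (ranges, c, prev)).1, 0,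
            some (l.foldl (stepB mgs) (ranges, c, prev)).2.1,
            (l.foldl (stepB mgs) (ranges, c, prev)).2.2) := by
  intro l
  induction l with
  | nil =>
    intro prev c ranges _ _
    simp only [List.getLast_singleton, List.foldl_nil]
    rw [PySem.List.pyRange_one_eq_nil (by omega)]
    simp
  | cons q l' ih =>
    intro prev c ranges hmem hch
    rw [List.isChain_cons_cons] at hch
    obtain ⟨⟨hpq, hgap⟩, hch'⟩ := hch
    have hqmem : q ∈ points := hmem q (by simp)
    have hqL : q ≤ (q :: l').getLast (by simp) :=
      chain_le_getLast _ (fun a b hab => hab.1) l' q hch'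
    have hLeq : (prev :: q :: l').getLast (by simp) = (q :: l').getLast (by simp) :=
      List.getLast_cons (by simp)
    rw [hLeq]
    rw [PySem.List.pyRange_one_append (prev + 1) (q + 1) ((q :: l').getLast (by simp) + 1)
      (by omega) (by omega), List.foldl_append]
    rw [segA points mgs prev q c ranges hpq hqmem hgap]
    rw [List.foldl_cons]
    by_cases hc : 0 < mgs ∧ mgs ≤ q - prev - 1
    · rw [if_pos hc]
      have hB : stepB mgs (ranges, c, prev) q = (ranges ++ [(c, prev)], q, q) := by
        simp [stepB, hc]
      rw [hB]
      exact ih q q (ranges ++ [(c, prev)]) (fun b hb => hmem b (by simp [hb])) hch'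
    · rw [if_neg hc]
      have hB : stepB mgs (ranges, c, prev) q = (ranges, c, q) := by
        simp only [stepB, if_neg hc]
      rw [hB]
      exact ih q c ranges (fun b hb => hmem b (by simp [hb])) hch'

-- a sorted list containing every point is a chain with no points in the gaps
theorem mk_chain (points : List Int) :
    ∀ (l : List Int) (a : Int), List.Pairwise (· ≤ ·) (a :: l) →
      (∀ j : Int, j ∈ points → j ∈ a :: l ∨ j ≤ a) →
      List.IsChain (fun x y => x ≤ y ∧ ∀ j : Int, x < j → j < y → j ∉ points)
        (a :: l) := by
  intro l
  induction l with
  | nil => intro a _ _; simp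
  | cons b t ih =>
    intro a hpw hcov
    rw [List.isChain_cons_cons]
    have hab : a ≤ b := (List.pairwise_cons.mp hpw).1 b (by simp)
    refine ⟨⟨hab, ?_⟩, ?_⟩
    · intro j hj1 hj2 hjmem
      rcases hcov j hjmem with hin | hle
      · rcases List.mem_cons.mp hin with rfl | hin'
        · omega
        · rcases List.mem_cons.mp hin' with rfl | hin''
          · omega
          · have : b ≤ j :=
              ((List.pairwise_cons.mp (List.pairwise_cons.mp hpw).2).1) j hin''
            omega
      · omega
    · refine ih b (List.pairwise_cons.mp hpw).2 ?_
      intro j hj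
      rcases hcov j hj with hin | hle
      · rcases List.mem_cons.mp hin with rfl | hin'
        · exact Or.inr hab
        · exact Or.inl hin'
      · exact Or.inr (le_trans hle hab)

-- every element of a ≤-sorted list is at most its last element
theorem le_getLast_of_pairwise :
    ∀ (l : List Int) (a x : Int), List.Pairwise (· ≤ ·) (a :: l) → x ∈ a :: l →
      x ≤ (a :: l).getLast (by simp) := by
  intro l
  induction l with
  | nil => intro a x _ hx; simp at hx; simp [hx]
  | cons b t ih =>
    intro a x hpw hx
    rw [List.getLast_cons (by simp)]
    rcases List.mem_cons.mp hx with rfl | hx'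
    · have hlast : (b :: t).getLast (by simp) ∈ b :: t := List.getLast_mem (by simp)
      exact (List.pairwise_cons.mp hpw).1 _ hlast
    · exact ih b x (List.pairwise_cons.mp hpw).2 hx'

-- ===== VERDICT (by name: the statement is the Claim_ definition above) =====
theorem point_ranges_spec : Claim_equal_point_ranges := by
  intro points mgs _ hpre
  unfold Spec_point_ranges
  obtain ⟨p0, rest, hs⟩ : ∃ p0 rest,
      PySem.List.sorted points (fun x => x) false = p0 :: rest := by
    cases h : PySem.List.sorted points (fun x => x) false with
    | nil => exact absurd ((PySem.List.sorted_eq_nil_iff points (fun x => x) false).mp h) hpre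
    | cons a t => exact ⟨a, t, rfl⟩
  have hperm : (p0 :: rest).Perm points := by
    rw [← hs]; exact PySem.List.sorted_perm points (fun x => x) false
  have hpw : List.Pairwise (· ≤ ·) (p0 :: rest) := by
    have h := PySem.List.sorted_pairwise (xs := points) (key := fun x => x)
    rw [hs] at h
    exact h
  have hmem_s : ∀ j : Int, j ∈ points → j ∈ p0 :: rest := by
    intro j hj
    exact hperm.mem_iff.mpr hj
  have hmem_pts : ∀ j ∈ p0 :: rest, j ∈ points := by
    intro j hj
    exact hperm.mem_iff.mp hj
  -- min(points) is the head of the sorted list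
  obtain ⟨m, hm⟩ : ∃ m, PySem.List.min? points (fun x => x) = some m := by
    cases h : PySem.List.min? points (fun x => x) with
    | none => exact absurd ((PySem.List.min?_eq_none_iff points (fun x => x)).mp h) hpre
    | some m => exact ⟨m, rfl⟩
  have hmp0 : m = p0 := by
    have h1 : m ≤ p0 := by
      have h' := PySem.List.min?_isMin hm
      exact h' p0 (hmem_pts p0 (by simp))
    have h2 : p0 ≤ m := by
      rcases List.mem_cons.mp (hmem_s m (PySem.List.min?_mem hm)) with rfl | hmr
      · exact le_rfl
      · exact (List.pairwise_cons.mp hpw).1 m hmr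
    omega
  -- max(points) is the last of the sorted list
  obtain ⟨u, hu⟩ : ∃ u, PySem.List.max? points (fun x => x) = some u := by
    cases h : PySem.List.max? points (fun x => x) with
    | none => exact absurd ((PySem.List.max?_eq_none_iff points (fun x => x)).mp h) hpre
    | some u => exact ⟨u, rfl⟩
  have huL : u = (p0 :: rest).getLast (by simp) := by
    have h1 : u ≤ (p0 :: rest).getLast (by simp) :=
      le_getLast_of_pairwise rest p0 u hpw (hmem_s u (PySem.List.max?_mem hu))
    have h2 : (p0 :: rest).getLast (by simp) ≤ u := by
      have h' := PySem.List.max?_isMax hu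
      exact h' _ (hmem_pts _ (List.getLast_mem (by simp)))
    omega
  have hp0L : p0 ≤ (p0 :: rest).getLast (by simp) :=
    le_getLast_of_pairwise rest p0 p0 hpw (by simp)
  have hmem0 : p0 ∈ points := hmem_pts p0 (by simp)
  have hchain := mk_chain points rest p0 hpw (fun j hj => Or.inl (hmem_s j hj))
  rcases hfb : rest.foldl (stepB mgs) ([], p0, p0) with ⟨r, s, pv⟩
  simp only [point_ranges, hm, hu, huL, hmp0]
  rw [PySem.List.pyRange_one_cons (by omega), List.foldl_cons]
  have hstep0 : stepA points mgs (([] : List (Int × Int)), 0, none, 0) p0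
      = ([], 0, some p0, p0) := by simp [stepA, hmem0]
  rw [hstep0]
  rw [mainA points mgs rest p0 p0 [] (fun b hb => hmem_pts b (by simp [hb])) hchain]
  rw [hfb]
  simp only [point_ranges_alt, hs, hfb]
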